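-- pv_equiv track=rewrite | github.com/CooperBigFoot/hfx | adapters/merit/build_adapter.py | balanced_row_group_bounds
-- ===== SOURCE A (Python) =====
-- import math
--
-- ROW_GROUP_MIN = 4096
--
-- ROW_GROUP_MAX = 8192
--
-- def balanced_row_group_bounds(
--     total_rows: int,
--     min_size: int = ROW_GROUP_MIN,
--     max_size: int = ROW_GROUP_MAX,
-- ) -> list[tuple[int, int]]:
--     """Split ``total_rows`` into row-group slices of size in ``[min_size, max_size]``."""
--     if total_rows <= 0:
--         return []
--
--     min_groups = math.ceil(total_rows / max_size)
--     max_groups = max(1, total_rows // min_size)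
--     group_count = max_groups
--     while group_count >= min_groups:
--         base = total_rows // group_count
--         remainder = total_rows % group_count
--         if min_size <= base <= max_size and base + (1 if remainder else 0) <= max_size:
--             bounds: list[tuple[int, int]] = []
--             start = 0
--             for index in range(group_count):
--                 size = base + (1 if index < remainder else 0)
--                 stop = start + size
--                 bounds.append((start, stop))
--                 start = stop
--             return bounds
--         group_count -= 1
--
--     return [(0, total_rows)]
-- ===== SOURCE B (Python) =====
-- ROW_GROUP_MIN = 4096
-- ROW_GROUP_MAX = 8192
--
-- def balanced_row_group_bounds(
--     total_rows: int,
--     min_size: int = ROW_GROUP_MIN,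
--     max_size: int = ROW_GROUP_MAX,
-- ) -> list[tuple[int, int]]:
--     """Split total_rows into row-group slices of size in [min_size, max_size].
--
--     No search loop: only group_count = max(1, total_rows // min_size) can ever be
--     accepted (shrinking the count only grows the per-group size), so decide with
--     one check and emit each bound from a closed-form offset.
--     """
--     if total_rows <= 0:
--         return []
--     groups = max(1, total_rows // min_size)
--     base, remainder = divmod(total_rows, groups)
--     largest = base + (1 if remainder else 0)
--     if groups < -(-total_rows // max_size) or base < min_size or largest > max_size:
--         return [(0, total_rows)]
--     return [
--         (i * base + min(i, remainder), (i + 1) * base + min(i + 1, remainder))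
--         for i in range(groups)
--     ]
-- ===== Notes on version B (the rewrite author's own statement) =====
-- stated objective: simpler
-- what changed: Replaced A's descending while-loop search over candidate group counts by a single closed-form check (only the largest candidate count max(1, total_rows//min_size) can ever be accepted, since shrinking the count only grows per-group sizes) and replaced the accumulator loop building bounds by a comprehension with closed-form offsets i*base + min(i, remainder).
import Mathlib
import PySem

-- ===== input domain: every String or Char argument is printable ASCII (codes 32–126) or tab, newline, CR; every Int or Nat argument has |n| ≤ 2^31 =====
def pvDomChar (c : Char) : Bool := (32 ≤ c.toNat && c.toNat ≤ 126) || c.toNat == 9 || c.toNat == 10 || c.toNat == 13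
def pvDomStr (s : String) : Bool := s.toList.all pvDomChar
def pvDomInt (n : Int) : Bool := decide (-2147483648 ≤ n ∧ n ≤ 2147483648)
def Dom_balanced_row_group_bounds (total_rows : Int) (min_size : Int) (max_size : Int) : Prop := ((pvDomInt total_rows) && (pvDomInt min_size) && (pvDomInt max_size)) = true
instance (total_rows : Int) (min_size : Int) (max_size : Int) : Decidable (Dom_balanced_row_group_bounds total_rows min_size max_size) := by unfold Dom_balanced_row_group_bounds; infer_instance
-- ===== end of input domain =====

-- B replaces A's descending search over group counts by a single closed-form check
-- (only the largest candidate count can ever be accepted) and emits each bound from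
-- a closed-form offset instead of a running accumulator; objective: simpler.

-- ===== PORT A =====
-- the inner `for index in range(group_count)` loop: fold carrying (bounds, start)
def brgbBuild (base remainder group_count : Int) : List (Int × Int) :=
  ((PySem.List.pyRange 0 group_count 1).foldl
    (fun (st : List (Int × Int) × Int) index =>
      let size := base + (if index < remainder then (1 : Int) else 0)
      let stop := st.2 + size
      (st.1 ++ [(st.2, stop)], stop)) ([], 0)).1

-- the `while group_count >= min_groups` loop of A
def brgbLoop (total_rows min_size max_size min_groups group_count : Int) : List (Int × Int) :=
  if h : min_groups ≤ group_count then
    let base := PySem.Int.floordiv total_rows group_count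
    let remainder := PySem.Int.mod total_rows group_count
    if min_size ≤ base ∧ base ≤ max_size ∧ base + (if remainder ≠ 0 then (1 : Int) else 0) ≤ max_size then
      brgbBuild base remainder group_count
    else
      brgbLoop total_rows min_size max_size min_groups (group_count - 1)
  else
    [(0, total_rows)]
termination_by (group_count + 1 - min_groups).toNat
decreasing_by omega

def balanced_row_group_bounds (total_rows : Int) (min_size : Int) (max_size : Int) : List (Int × Int) :=
  if total_rows ≤ 0 then []
  else
    -- math.ceil(total_rows / max_size): exact as the integer ceiling -((-a)//b) on Dom (|n| ≤ 2^31)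
    let min_groups := -(PySem.Int.floordiv (-total_rows) max_size)
    let max_groups := max 1 (PySem.Int.floordiv total_rows min_size)
    brgbLoop total_rows min_size max_size min_groups max_groups

-- ===== PORT B =====
def balanced_row_group_bounds_alt (total_rows : Int) (min_size : Int) (max_size : Int) : List (Int × Int) :=
  if total_rows ≤ 0 then []
  else
    let groups := max 1 (PySem.Int.floordiv total_rows min_size)
    let base := PySem.Int.floordiv total_rows groups
    let remainder := PySem.Int.mod total_rows groups
    let largest := base + (if remainder ≠ 0 then (1 : Int) else 0)
    if groups < -(PySem.Int.floordiv (-total_rows) max_size) ∨ base < min_size ∨ max_size < largest then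
      [(0, total_rows)]
    else
      (PySem.List.pyRange 0 groups 1).map
        (fun i => (i * base + min i remainder, (i + 1) * base + min (i + 1) remainder))

-- ===== PRECONDITION & SPEC =====
-- Pre_ excludes exactly the inputs where A raises ZeroDivisionError: total_rows > 0 with
-- min_size = 0 (total_rows // 0) or max_size ≤ 0 (ceil by 0, or the search counting down to 0).
def Pre_balanced_row_group_bounds (total_rows : Int) (min_size : Int) (max_size : Int) : Prop :=
  total_rows ≤ 0 ∨ (min_size ≠ 0 ∧ 1 ≤ max_size)
instance (total_rows : Int) (min_size : Int) (max_size : Int) : Decidable (Pre_balanced_row_group_bounds total_rows min_size max_size) := by unfold Pre_balanced_row_group_bounds; infer_instance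
def pvWitness_balanced_row_group_bounds : Int × Int × Int := (10000, 4096, 8192)

def Spec_balanced_row_group_bounds (total_rows : Int) (min_size : Int) (max_size : Int) (out : List (Int × Int)) : Prop := out = balanced_row_group_bounds_alt total_rows min_size max_size
instance (total_rows : Int) (min_size : Int) (max_size : Int) (out : List (Int × Int)) : Decidable (Spec_balanced_row_group_bounds total_rows min_size max_size out) := by unfold Spec_balanced_row_group_bounds; infer_instance

-- ===== CLAIM (what is proved, stated in full; the proofs are below) =====
def Claim_equal_balanced_row_group_bounds : Prop := ∀ (total_rows : Int) (min_size : Int) (max_size : Int), Dom_balanced_row_group_bounds total_rows min_size max_size → Pre_balanced_row_group_bounds total_rows min_size max_size → Spec_balanced_row_group_bounds total_rows min_size max_size (balanced_row_group_bounds total_rows min_size max_size)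

-- ===== LEMMAS AND PROOFS =====

-- A's inner fold from start = j*base + min j r builds exactly B's closed-form slice list.
lemma brgb_fold_eq_map (base r g : Int) :
    ∀ (n : Nat) (j : Int) (acc : List (Int × Int)), (g - j).toNat = n →
      ((PySem.List.pyRange j g 1).foldl
        (fun (st : List (Int × Int) × Int) index =>
          let size := base + (if index < r then (1 : Int) else 0)
          let stop := st.2 + size
          (st.1 ++ [(st.2, stop)], stop)) (acc, j * base + min j r)).1
      = acc ++ (PySem.List.pyRange j g 1).map
          (fun i => (i * base + min i r, (i + 1) * base + min (i + 1) r)) := by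
  intro n
  induction n with
  | zero =>
    intro j acc h0
    have hj : g ≤ j := by omega
    have : PySem.List.pyRange j g 1 = [] := by
      simp [PySem.List.pyRange_one, show (g - j).toNat = 0 by omega]
    simp [this]
  | succ n ih =>
    intro j acc h
    have hj : j < g := by omega
    rw [PySem.List.pyRange_one_cons hj]
    simp only [List.foldl_cons, List.map_cons]
    have hstep : j * base + min j r + (base + (if j < r then (1 : Int) else 0))
        = (j + 1) * base + min (j + 1) r := by
      have hmin : min (j + 1) r = min j r + (if j < r then (1 : Int) else 0) := by
        split <;> omega
      rw [hmin]; ring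
    have ih' := ih (j + 1) (acc ++ [(j * base + min j r, (j + 1) * base + min (j + 1) r)])
      (by omega)
    simp only [hstep]
    rw [ih']
    simp

lemma brgbBuild_eq_map (base r g : Int) (hr : 0 ≤ r) :
    brgbBuild base r g = (PySem.List.pyRange 0 g 1).map
      (fun i => (i * base + min i r, (i + 1) * base + min (i + 1) r)) := by
  have h := brgb_fold_eq_map base r g (g - 0).toNat 0 [] rfl
  simp only [zero_mul, zero_add, min_eq_left hr, List.nil_append] at h
  simpa [brgbBuild, min_eq_left hr] using h

-- If every candidate count in [min_groups, g] is invalid, A's search returns the fallback.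
lemma brgbLoop_fallback (t mn mx mg : Int) :
    ∀ (n : Nat) (g : Int), (g + 1 - mg).toNat = n →
    (∀ g', mg ≤ g' → g' ≤ g →
      ¬ (mn ≤ PySem.Int.floordiv t g' ∧ PySem.Int.floordiv t g' ≤ mx ∧
         PySem.Int.floordiv t g' + (if PySem.Int.mod t g' ≠ 0 then (1 : Int) else 0) ≤ mx)) →
    brgbLoop t mn mx mg g = [(0, t)] := by
  intro n
  induction n with
  | zero =>
    intro g h0 _
    rw [brgbLoop, dif_neg (by omega)]
  | succ n ih =>
    intro g h hinv
    have hg : mg ≤ g := by omega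
    rw [brgbLoop, dif_pos hg, if_neg (hinv g hg le_rfl)]
    exact ih (g - 1) (by omega) (fun g' h1 h2 => hinv g' h1 (by omega))

theorem balanced_row_group_bounds_spec : Claim_equal_balanced_row_group_bounds := by
  intro t mn mx _ hpre
  unfold Spec_balanced_row_group_bounds
  by_cases ht : t ≤ 0
  · simp [balanced_row_group_bounds, balanced_row_group_bounds_alt, ht]
  have ht1 : 1 ≤ t := by omega
  rcases hpre with h | ⟨hmn, hmx⟩
  · omega
  have hmx0 : (0 : Int) < mx := by omega
  simp only [balanced_row_group_bounds, balanced_row_group_bounds_alt, if_neg ht]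
  set G : Int := max 1 (PySem.Int.floordiv t mn) with hGdef
  set mg : Int := -(PySem.Int.floordiv (-t) mx) with hmgdef
  set base : Int := PySem.Int.floordiv t G with hbasedef
  set r : Int := PySem.Int.mod t G with hrdef
  have hG1 : 1 ≤ G := le_max_left _ _
  have hGpos : (0 : Int) < G := by omega
  have hbr : base * G + r = t := PySem.Int.floordiv_mul_add_mod t G
  have hr0 : 0 ≤ r := PySem.Int.mod_nonneg t hGpos
  have hrG : r < G := PySem.Int.mod_lt t hGpos
  have hbb : base * G ≤ t ∧ t < (base + 1) * G :=
    (PySem.Int.floordiv_eq_iff_of_pos hGpos).mp hbasedef.symm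
  have hmgb : (mg - 1) * mx < t ∧ t ≤ mg * mx :=
    (PySem.Int.neg_floordiv_neg_eq_iff_of_pos hmx0).mp hmgdef.symm
  have hmg1 : 1 ≤ mg := by nlinarith [hmgb.2]
  -- 1 ≤ base, and base ≥ mn whenever mn ≤ t (for 1 ≤ mn)
  have hbase1 : 1 ≤ base := by
    rw [hbasedef, PySem.Int.le_floordiv_iff_mul_le hGpos, one_mul]
    -- G ≤ t
    rcases lt_or_ge mn 0 with hneg | hpos
    · -- mn < 0: t // mn ≤ -1, so G = 1
      have hmod := PySem.Int.floordiv_mul_add_mod t mn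
      have hmb := PySem.Int.mod_neg_bounds t (show mn < 0 by omega)
      have hq : PySem.Int.floordiv t mn ≤ 0 := by nlinarith
      omega
    · have hmn1 : 1 ≤ mn := by omega
      have hq : PySem.Int.floordiv t mn * mn ≤ t ∧ t < (PySem.Int.floordiv t mn + 1) * mn :=
        (PySem.Int.floordiv_eq_iff_of_pos (show (0:Int) < mn by omega)).mp rfl
      rcases le_or_gt (PySem.Int.floordiv t mn) 1 with h1 | h1
      · omega
      · have : G = PySem.Int.floordiv t mn := by omega
        nlinarith [hq.1]
  by_cases hC : G < mg ∨ base < mn ∨ mx < base + (if r ≠ 0 then (1 : Int) else 0)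
  · rw [if_pos hC]
    apply brgbLoop_fallback t mn mx mg (G + 1 - mg).toNat G rfl
    intro g' h1 h2 ⟨v1, v2, v3⟩
    have hg'pos : (0 : Int) < g' := by omega
    set bg : Int := PySem.Int.floordiv t g' with hbgdef
    set rg : Int := PySem.Int.mod t g' with hrgdef
    have hbgb : bg * g' ≤ t ∧ t < (bg + 1) * g' :=
      (PySem.Int.floordiv_eq_iff_of_pos hg'pos).mp hbgdef.symm
    have hbgr : bg * g' + rg = t := PySem.Int.floordiv_mul_add_mod t g'
    have hrg0 : 0 ≤ rg := PySem.Int.mod_nonneg t hg'pos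
    -- bg ≥ base
    have hble : base ≤ bg := by nlinarith [hbgb.2, hbb.1]
    rcases hC with h | h | h
    · omega
    · -- base < mn: then t < mn, hence bg ≤ t < mn, contradicting mn ≤ bg
      have htmn : t < mn := by
        by_contra habs
        push Not at habs
        rcases lt_or_ge mn 0 with hneg | hpos
        · omega
        · have hmn1 : 1 ≤ mn := by omega
          have hq : PySem.Int.floordiv t mn * mn ≤ t ∧ t < (PySem.Int.floordiv t mn + 1) * mn :=
            (PySem.Int.floordiv_eq_iff_of_pos (show (0:Int) < mn by omega)).mp rfl
          have hq1 : 1 ≤ PySem.Int.floordiv t mn := by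
            rw [PySem.Int.le_floordiv_iff_mul_le (show (0:Int) < mn by omega)]; omega
          have hGq : G = PySem.Int.floordiv t mn := by omega
          have : mn ≤ base := by
            rw [hbasedef, hGq, PySem.Int.le_floordiv_iff_mul_le (by omega)]
            nlinarith [hq.1]
          omega
      have hbg0 : 0 ≤ bg := by
        rw [hbgdef, PySem.Int.le_floordiv_iff_mul_le hg'pos] at *
        · omega
      have : bg ≤ t := by nlinarith [hbgb.1]
      omega
    · -- mx < base + e: every bg is too large
      rcases lt_or_ge base bg with hlt | hle
      · have : base + (if r ≠ 0 then (1 : Int) else 0) ≤ bg := by split <;> omega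
        omega
      · have hbg : bg = base := by omega
        by_cases hrz : r = 0
        · simp [hrz] at h; omega
        · -- r ≠ 0: show rg ≠ 0
          have hrpos : 0 < r := by omega
          have hrg : rg = r + base * (G - g') := by nlinarith [hbgr, hbr, hbg]
          have hrgpos : 0 < rg := by nlinarith
          rw [if_pos hrz] at h
          have : rg ≠ 0 := by omega
          rw [if_pos this] at v3
          omega
  · rw [if_neg hC]
    push Not at hC
    obtain ⟨hmgG, hmnb, hlmx⟩ := hC
    have hvalid : mn ≤ base ∧ base ≤ mx ∧ base + (if r ≠ 0 then (1 : Int) else 0) ≤ mx := by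
      refine ⟨hmnb, ?_, by omega⟩
      split at hlmx <;> omega
    rw [brgbLoop, dif_pos hmgG, if_pos hvalid]
    exact brgbBuild_eq_map base r G hr0
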